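-- pv_equiv track=rewrite | github.com/mikeAdamss/V4andRecipes | ASHE Pensions 8 and 12/ASHEpensions8and12.py | checkprov
-- ===== SOURCE A (Python) =====
-- def checkprov(files):
--
--     prov = False
--     revised = False
--
--     for f in files:
--         if 'prov' in f.lower():
--             prov = True
--         else:
--             revised = True
--
--     if prov and revised:
--         raise ValueError("You cannot use a mixture of Provisional and Revised data in the same dataset!")
--
--     if prov:
--         return prov
--     else:
--         return revised
-- ===== SOURCE B (Python) =====
-- def checkprov(files):
--     if not files:
--         return False
--     first = 'prov' in files[0].lower()
--     for f in files[1:]: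
--         if ('prov' in f.lower()) != first:
--             raise ValueError("You cannot use a mixture of Provisional and Revised data in the same dataset!")
--     return True
-- ===== Notes on version B (the rewrite author's own statement) =====
-- stated objective: simpler
-- what changed: Instead of accumulating prov/revised flags over the whole list and testing them afterwards, B takes the first file's flag as a reference and raises immediately at the first later file that disagrees; any non-empty consistent list is simply True and the empty list False, so no flag state is kept at all.
import Mathlib
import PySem

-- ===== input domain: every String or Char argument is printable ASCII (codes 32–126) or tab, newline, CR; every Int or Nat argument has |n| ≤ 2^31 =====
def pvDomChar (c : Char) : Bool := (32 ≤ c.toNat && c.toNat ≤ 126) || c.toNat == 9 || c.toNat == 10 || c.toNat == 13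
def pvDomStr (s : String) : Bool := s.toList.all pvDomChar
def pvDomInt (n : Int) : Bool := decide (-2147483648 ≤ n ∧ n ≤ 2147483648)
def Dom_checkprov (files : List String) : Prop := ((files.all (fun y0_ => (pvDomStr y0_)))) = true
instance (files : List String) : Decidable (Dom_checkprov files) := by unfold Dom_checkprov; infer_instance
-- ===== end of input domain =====

-- B keeps no flag state: it compares every later file's flag to the first file's and raises at the
-- first disagreement; a non-empty consistent list is True, the empty list False ('simpler').
-- Both A and B raise ValueError on a mixture of provisional and revised files; those inputs are outside Pre_.

-- the per-file test 'prov' in f.lower()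
def pvProv (f : String) : Bool := PySem.Str.isIn "prov" (PySem.Str.lower f)

-- ===== PORT A =====
def checkprov (files : List String) : Bool :=
  let st := files.foldl (fun (st : Bool × Bool) f =>
    if pvProv f then (true, st.2) else (st.1, true)) (false, false)
  if st.1 && st.2 then false  -- ValueError in Python; excluded by Pre_checkprov
  else if st.1 then st.1 else st.2

-- ===== PORT B =====
def checkprov_alt (files : List String) : Bool :=
  match files with
  | [] => false
  | f0 :: rest =>
    let first := pvProv f0
    -- the loop raises ValueError at the first disagreement; excluded by Pre_checkprov
    if rest.any (fun f => pvProv f != first) then false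
    else true

-- ===== PRECONDITION & SPEC =====
-- Pre_ excludes exactly the mixed inputs (some file provisional, some revised), on which both A and B raise ValueError.
def Pre_checkprov (files : List String) : Prop :=
  (∀ f ∈ files, pvProv f = true) ∨ (∀ f ∈ files, pvProv f = false)
instance (files : List String) : Decidable (Pre_checkprov files) := by unfold Pre_checkprov; infer_instance
def pvWitness_checkprov : List String := ["prov1.csv", "Provisional.csv"]
def Spec_checkprov (files : List String) (out : Bool) : Prop := out = checkprov_alt files
instance (files : List String) (out : Bool) : Decidable (Spec_checkprov files out) := by unfold Spec_checkprov; infer_instance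

-- ===== CLAIM (what is proved, stated in full; the proofs are below) =====
def Claim_equal_checkprov : Prop := ∀ (files : List String), Dom_checkprov files → Pre_checkprov files → Spec_checkprov files (checkprov files)

-- ===== LEMMAS AND PROOFS =====

-- A's loop keeps its state once the matching flag is set (uniform file lists)
theorem foldA_const_true (fs : List String) (h : ∀ f ∈ fs, pvProv f = true) (r : Bool) :
    fs.foldl (fun (st : Bool × Bool) f => if pvProv f then (true, st.2) else (st.1, true)) (true, r)
      = (true, r) := by
  induction fs with
  | nil => rfl
  | cons f fs ih =>
    simp only [List.foldl_cons, h f (by simp)]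
    exact ih (fun g hg => h g (by simp [hg]))

theorem foldA_const_false (fs : List String) (h : ∀ f ∈ fs, pvProv f = false) (p : Bool) :
    fs.foldl (fun (st : Bool × Bool) f => if pvProv f then (true, st.2) else (st.1, true)) (p, true)
      = (p, true) := by
  induction fs with
  | nil => rfl
  | cons f fs ih =>
    simp only [List.foldl_cons, h f (by simp)]
    exact ih (fun g hg => h g (by simp [hg]))

-- ===== VERDICT (by name: the statement is the Claim_ definition above) =====
theorem checkprov_spec : Claim_equal_checkprov := by
  intro files _ hpre
  unfold Spec_checkprov checkprov checkprov_alt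
  cases files with
  | nil => rfl
  | cons f fs =>
    have hB : fs.any (fun g => pvProv g != pvProv f) = false := by
      rw [List.any_eq_false]
      intro g hg
      rcases hpre with h | h
      · simp [h g (by simp [hg]), h f (by simp)]
      · simp [h g (by simp [hg]), h f (by simp)]
    rcases hpre with h | h
    · have hf : pvProv f = true := h f (by simp)
      have hfs : ∀ g ∈ fs, pvProv g = true := fun g hg => h g (by simp [hg])
      have h1 : (f :: fs).foldl (fun (st : Bool × Bool) f =>
          if pvProv f then (true, st.2) else (st.1, true)) (false, false) = (true, false) := by
        simp only [List.foldl_cons]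
        rw [if_pos hf]
        exact foldA_const_true fs hfs false
      rw [h1]
      simp [hB]
    · have hf : pvProv f = false := h f (by simp)
      have hfs : ∀ g ∈ fs, pvProv g = false := fun g hg => h g (by simp [hg])
      have h1 : (f :: fs).foldl (fun (st : Bool × Bool) f =>
          if pvProv f then (true, st.2) else (st.1, true)) (false, false) = (false, true) := by
        simp only [List.foldl_cons]
        rw [if_neg (by simp [hf])]
        exact foldA_const_false fs hfs false
      rw [h1]
      simp [hB]
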